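-- pv_equiv track=rewrite | github.com/NikiSuckau/omnimon | utilities/VBE/reorder_dims.py | reorder_characters
-- ===== SOURCE A (Python) =====
-- from collections import OrderedDict
--
-- DESIRED_ORDER = [
--     "25th Anniversary BEM",
--     "Ghost Game - Gammamon BE",
--     "Imperialdramon BE",
--     "Ghost Game - Angoramon BE",
--     "Ghost Game - Jellymon BE",
--     "draconic blaze",
--     "rampage of the beast",
--     "Loogamon BE",
--     "Holy Wings",
--     "Forest Guardian",
--     "Ryudamon BE",
--     "Dorumon BE",
--     "D-3 White & Yellow",
--     "D-3 White & Red",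
--     "Pulsemon BE",
--     "MHA 01",
--     "MHA 02",
--     "Tokyo Revengers 01",
--     "Demon Slayer 01",
--     "Demon Slayer 02",
--     "JJK 01",
--     "Tousouchuu Great Mission 01",
-- ]
--
-- def reorder_characters(data: dict) -> dict:
--     chars = data.get("characters", [])
--
--     # Group by folder_name, preserving the first-seen folder order and within-folder order
--     folder_to_entries: "OrderedDict[str, list]" = OrderedDict()
--     for entry in chars:
--         folder = entry.get("folder_name", "")
--         if folder not in folder_to_entries:
--             folder_to_entries[folder] = []
--         folder_to_entries[folder].append(entry)
--
--     # Build the new ordered list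
--     new_chars = []
--     seen = set()
--
--     # 1) Add folders in the desired order (if present)
--     for folder in DESIRED_ORDER:
--         if folder in folder_to_entries:
--             new_chars.extend(folder_to_entries[folder])
--             seen.add(folder)
--
--     # 2) Append any remaining folders in their original relative order
--     for folder, entries in folder_to_entries.items():
--         if folder not in seen:
--             new_chars.extend(entries)
--
--     out = dict(data)
--     out["characters"] = new_chars
--     return out
-- ===== SOURCE B (Python) =====
-- DESIRED_ORDER = [
--     "25th Anniversary BEM",
--     "Ghost Game - Gammamon BE",
--     "Imperialdramon BE",
--     "Ghost Game - Angoramon BE",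
--     "Ghost Game - Jellymon BE",
--     "draconic blaze",
--     "rampage of the beast",
--     "Loogamon BE",
--     "Holy Wings",
--     "Forest Guardian",
--     "Ryudamon BE",
--     "Dorumon BE",
--     "D-3 White & Yellow",
--     "D-3 White & Red",
--     "Pulsemon BE",
--     "MHA 01",
--     "MHA 02",
--     "Tokyo Revengers 01",
--     "Demon Slayer 01",
--     "Demon Slayer 02",
--     "JJK 01",
--     "Tousouchuu Great Mission 01",
-- ]
--
-- def reorder_characters(data: dict) -> dict:
--     chars = data.get("characters", [])
--
--     # Non-desired folders in first-seen order
--     extras = []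
--     for e in chars:
--         f = e.get("folder_name", "")
--         if f not in DESIRED_ORDER and f not in extras:
--             extras.append(f)
--
--     # One filter pass per folder, in the final folder order; filtering is
--     # stable, so within-folder order is preserved automatically.
--     new_chars = [e for f in DESIRED_ORDER + extras
--                    for e in chars if e.get("folder_name", "") == f]
--
--     out = dict(data)
--     out["characters"] = new_chars
--     return out
-- ===== Notes on version B (the rewrite author's own statement) =====
-- stated objective: simpler
-- what changed: Replaces the OrderedDict grouping plus two-phase emission with a seen-set by a single first-seen scan for non-desired folders followed by one stable filter pass per folder in the final folder order; no grouping dict and no seen set are built.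
import Mathlib
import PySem

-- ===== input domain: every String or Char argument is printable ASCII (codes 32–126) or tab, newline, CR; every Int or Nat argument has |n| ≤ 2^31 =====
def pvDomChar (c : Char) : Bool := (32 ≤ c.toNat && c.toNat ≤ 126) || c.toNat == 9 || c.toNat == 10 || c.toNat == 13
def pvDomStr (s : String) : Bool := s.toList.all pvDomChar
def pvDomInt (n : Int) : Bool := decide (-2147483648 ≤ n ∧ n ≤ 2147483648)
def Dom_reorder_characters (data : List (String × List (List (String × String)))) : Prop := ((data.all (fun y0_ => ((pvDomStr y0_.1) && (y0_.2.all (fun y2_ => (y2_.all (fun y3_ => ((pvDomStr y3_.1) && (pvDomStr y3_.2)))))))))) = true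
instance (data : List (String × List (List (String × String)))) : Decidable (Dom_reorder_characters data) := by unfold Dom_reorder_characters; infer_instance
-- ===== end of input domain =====

-- B replaces A's OrderedDict grouping + seen-set two-phase emission by one first-seen
-- scan for non-desired folders followed by a stable filter pass per folder (objective:
-- simpler; not faster). Return-value equivalence only; neither program mutates its input.

def DESIRED_ORDER : List String := [
  "25th Anniversary BEM",
  "Ghost Game - Gammamon BE",
  "Imperialdramon BE",
  "Ghost Game - Angoramon BE",
  "Ghost Game - Jellymon BE",
  "draconic blaze",
  "rampage of the beast",
  "Loogamon BE",
  "Holy Wings",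
  "Forest Guardian",
  "Ryudamon BE",
  "Dorumon BE",
  "D-3 White & Yellow",
  "D-3 White & Red",
  "Pulsemon BE",
  "MHA 01",
  "MHA 02",
  "Tokyo Revengers 01",
  "Demon Slayer 01",
  "Demon Slayer 02",
  "JJK 01",
  "Tousouchuu Great Mission 01"]

-- ===== PORT A =====
def reorder_characters (data : List (String × List (List (String × String)))) : List (String × List (List (String × String))) :=
  let chars := (PySem.Dict.mk data).getD "characters" []
  -- group by folder_name, preserving first-seen folder order and within-folder order
  let folder_to_entries : PySem.Dict String (List (List (String × String))) :=
    chars.foldl (fun d entry =>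
      let folder := (PySem.Dict.mk entry).getD "folder_name" ""
      let d1 := if d.contains folder then d else d.insert folder []
      d1.modify folder [] (fun l => l ++ [entry])) PySem.Dict.empty
  -- 1) folders in the desired order (if present), recording them in `seen`
  let step1 :=
    DESIRED_ORDER.foldl (fun (p : List (List (String × String)) × PySem.Set String) folder =>
      if folder_to_entries.contains folder then
        (p.1 ++ folder_to_entries.getD folder [], p.2.add folder)
      else p) ([], PySem.Set.empty)
  -- 2) remaining folders in their original relative order
  let new_chars :=
    folder_to_entries.items.foldl (fun acc kv =>
      if step1.2.contains kv.1 then acc else acc ++ kv.2) step1.1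
  ((PySem.Dict.mk data).insert "characters" new_chars).items

-- ===== PORT B =====
def reorder_characters_alt (data : List (String × List (List (String × String)))) : List (String × List (List (String × String))) :=
  let chars := (PySem.Dict.mk data).getD "characters" []
  -- non-desired folders in first-seen order
  let extras : List String :=
    chars.foldl (fun ex e =>
      let f := (PySem.Dict.mk e).getD "folder_name" ""
      if f ∉ DESIRED_ORDER ∧ f ∉ ex then ex ++ [f] else ex) []
  -- one stable filter pass per folder, in the final folder order
  let new_chars :=
    (DESIRED_ORDER ++ extras).flatMap (fun f =>
      chars.filter (fun e => (PySem.Dict.mk e).getD "folder_name" "" == f))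
  ((PySem.Dict.mk data).insert "characters" new_chars).items

-- ===== PRECONDITION & SPEC =====
def Spec_reorder_characters (data : List (String × List (List (String × String)))) (out : List (String × List (List (String × String)))) : Prop := out = reorder_characters_alt data
instance (data : List (String × List (List (String × String)))) (out : List (String × List (List (String × String)))) : Decidable (Spec_reorder_characters data out) := by unfold Spec_reorder_characters; infer_instance

-- ===== CLAIM (what is proved, stated in full; the proofs are below) =====
def Claim_equal_reorder_characters : Prop := ∀ (data : List (String × List (List (String × String)))), Dom_reorder_characters data → Spec_reorder_characters data (reorder_characters data)

-- ===== LEMMAS AND PROOFS =====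

-- the folder key of one character entry
def pvFol (e : List (String × String)) : String := (PySem.Dict.mk e).getD "folder_name" ""

-- all entries of `chars` whose folder is `f`, in order
def pvFilt (chars : List (List (String × String))) (f : String) : List (List (String × String)) :=
  chars.filter (fun e => pvFol e == f)

-- A's grouping dict
def pvGrp (chars : List (List (String × String))) : PySem.Dict String (List (List (String × String))) :=
  chars.foldl (fun d entry =>
    let folder := pvFol entry
    let d1 := if d.contains folder then d else d.insert folder []
    d1.modify folder [] (fun l => l ++ [entry])) PySem.Dict.empty

-- the distinct folders of `chars`, in first-seen order
def pvKS (chars : List (List (String × String))) : PySem.Set String :=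
  PySem.Set.ofList (chars.map pvFol)

theorem pv_step_absorb (d : PySem.Dict String (List (List (String × String)))) (f : String)
    (e : List (String × String)) :
    (if d.contains f then d else d.insert f []).modify f [] (fun l => l ++ [e]) =
      d.modify f [] (fun l => l ++ [e]) := by
  by_cases h : d.contains f = true
  · simp [h]
  · simp only [h, if_neg, Bool.not_eq_true]
    simp only [PySem.Dict.modify]
    rw [PySem.Dict.getD_insert_self, PySem.Dict.insert_insert_self,
      PySem.Dict.getD_of_not_contains d [] (by simpa using h)]

theorem pv_grp_eq_modify_fold (chars : List (List (String × String))) :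
    pvGrp chars = chars.foldl (fun d e => d.modify (pvFol e) [] (fun l => l ++ [e]))
      PySem.Dict.empty := by
  unfold pvGrp
  exact PySem.List.foldl_congr_mem chars _ _ _ (fun d e _ => pv_step_absorb d (pvFol e) e)

theorem pv_grp_getD (chars : List (List (String × String))) (c : String) :
    (pvGrp chars).getD c [] = pvFilt chars c := by
  rw [pv_grp_eq_modify_fold]
  have h := PySem.Dict.getD_foldl_modify_append (chars.map (fun e => (pvFol e, e)))
    (PySem.Dict.empty (κ := String) (ν := List (List (String × String)))) c
  simp only [List.foldl_map] at h
  simpa [pvFilt, List.filter_map, Function.comp_def, PySem.Dict.getD_empty] using h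

theorem pv_grp_keys (chars : List (List (String × String))) :
    (pvGrp chars).keys = pvKS chars := by
  rw [pv_grp_eq_modify_fold]
  rw [PySem.Dict.keys_foldl_modify_key chars pvFol [] (fun _ e l => l ++ [e]) PySem.Dict.empty]
  simp [pvKS, PySem.Set.update, PySem.Dict.keys_empty, PySem.Set.ofList_eq_foldl]

theorem pv_grp_nodup (chars : List (List (String × String))) :
    (pvGrp chars).keys.Nodup := by
  rw [pv_grp_eq_modify_fold]
  exact PySem.Dict.nodup_keys_foldl_modify_key chars pvFol [] (fun _ e l => l ++ [e])
    PySem.Dict.empty PySem.Dict.nodup_keys_empty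

theorem pv_mem_KS (chars : List (List (String × String))) (f : String) :
    f ∈ pvKS chars ↔ f ∈ chars.map pvFol := PySem.Set.mem_ofList _ _

theorem pv_contains_grp (chars : List (List (String × String))) (f : String) :
    (pvGrp chars).contains f = true ↔ f ∈ pvKS chars := by
  rw [PySem.Dict.contains_iff_mem_keys, pv_grp_keys]

theorem pv_filt_nil (chars : List (List (String × String))) (f : String)
    (h : f ∉ chars.map pvFol) : pvFilt chars f = [] := by
  rw [pvFilt, List.filter_eq_nil_iff]
  intro e he hf
  exact h (List.mem_map.mpr ⟨e, he, by simpa using hf⟩)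

-- phase-1 loop shape: accumulated entries and the seen set, in closed form
theorem pv_step1_fold (dct : PySem.Dict String (List (List (String × String))))
    (l : List String) (acc : List (List (String × String))) (s : PySem.Set String) :
    l.foldl (fun p folder =>
        if dct.contains folder then (p.1 ++ dct.getD folder [], p.2.add folder) else p) (acc, s)
    = (acc ++ l.flatMap (fun f => if dct.contains f then dct.getD f [] else []),
       l.foldl (fun t f => if dct.contains f then t.add f else t) s) := by
  induction l generalizing acc s with
  | nil => simp
  | cons x xs ih =>
    by_cases h : dct.contains x = true <;> simp [h, ih]

theorem pv_seen_mem (dct : PySem.Dict String (List (List (String × String))))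
    (l : List String) (s : PySem.Set String) (f : String) :
    f ∈ l.foldl (fun t g => if dct.contains g then t.add g else t) s ↔
      f ∈ s ∨ (f ∈ l ∧ dct.contains f = true) := by
  induction l generalizing s with
  | nil => simp
  | cons x xs ih =>
    by_cases h : dct.contains x = true
    · simp only [List.foldl_cons, h, if_pos, ih, PySem.Set.mem_add, List.mem_cons]
      constructor
      · rintro ((hs | rfl) | hl)
        · exact Or.inl hs
        · exact Or.inr ⟨Or.inl rfl, h⟩
        · exact Or.inr ⟨Or.inr hl.1, hl.2⟩
      · rintro (hs | ⟨(rfl | hl), hf⟩)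
        · exact Or.inl (Or.inl hs)
        · exact Or.inl (Or.inr rfl)
        · exact Or.inr ⟨hl, hf⟩
    · simp only [List.foldl_cons, h, if_neg, Bool.not_eq_true, ih, List.mem_cons]
      constructor
      · rintro (hs | hl)
        · exact Or.inl hs
        · exact Or.inr ⟨Or.inr hl.1, hl.2⟩
      · rintro (hs | ⟨(rfl | hl), hf⟩)
        · exact Or.inl hs
        · exact absurd hf (by simpa using h)
        · exact Or.inr ⟨hl, hf⟩

-- phase-2 loop shape
theorem pv_tail_fold (seen : PySem.Set String)
    (items : List (String × List (List (String × String))))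
    (init : List (List (String × String))) :
    items.foldl (fun acc kv => if seen.contains kv.1 then acc else acc ++ kv.2) init
      = init ++ items.flatMap (fun kv => if seen.contains kv.1 then [] else kv.2) := by
  rw [PySem.List.foldl_congr_mem items _
    (fun acc kv => acc ++ (if seen.contains kv.1 then [] else kv.2)) init
    (by intro acc kv _; by_cases h : kv.1 ∈ seen <;> simp [h])]
  exact PySem.List.foldl_append_eq_flatMap _ items init

-- B's extras loop equals the non-desired folders of `chars`, first-seen order
theorem pv_filter_fold (p : String → Bool) (xs : List String) (s : PySem.Set String) :
    xs.foldl (fun ex f => if p f then ex else PySem.Set.add ex f) s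
      = (xs.filter (fun f => !p f)).foldl PySem.Set.add s := by
  induction xs generalizing s with
  | nil => rfl
  | cons x xs ih => by_cases h : p x = true <;> simp [h, ih]

theorem pv_add_filter (q : String → Bool) (s : PySem.Set String) (x : String) :
    (PySem.Set.add s x).filter q
      = if q x then PySem.Set.add (s.filter q) x else s.filter q := by
  by_cases hm : x ∈ s <;> by_cases hq : q x = true <;>
    simp [PySem.Set.add, hm, hq, List.mem_filter, List.filter_append]

theorem pv_ofList_filter_aux (q : String → Bool) (xs : List String) (s : PySem.Set String) :
    (xs.filter q).foldl PySem.Set.add (s.filter q) = (xs.foldl PySem.Set.add s).filter q := by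
  induction xs generalizing s with
  | nil => rfl
  | cons x xs ih =>
    by_cases hq : q x = true <;>
      · simp only [List.filter_cons, hq, Bool.false_eq_true, List.foldl_cons]
        rw [← ih (PySem.Set.add s x), pv_add_filter]
        simp [hq]

theorem pv_ofList_filter (q : String → Bool) (xs : List String) :
    PySem.Set.ofList (xs.filter q) = (PySem.Set.ofList xs).filter q := by
  rw [PySem.Set.ofList_eq_foldl, PySem.Set.ofList_eq_foldl]
  simpa using pv_ofList_filter_aux q xs []

theorem pv_extras_eq (chars : List (List (String × String))) :
    chars.foldl (fun ex e =>
        let f := pvFol e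
        if f ∉ DESIRED_ORDER ∧ f ∉ ex then ex ++ [f] else ex) []
      = (pvKS chars).filter (fun f => !decide (f ∈ DESIRED_ORDER)) := by
  rw [PySem.List.foldl_congr_mem chars _
    (fun ex e => if decide (pvFol e ∈ DESIRED_ORDER) then ex else PySem.Set.add ex (pvFol e)) []
    (by
      intro ex e _
      by_cases h1 : pvFol e ∈ DESIRED_ORDER
      · simp [h1]
      · by_cases h2 : pvFol e ∈ ex
        · simp [h1, h2, PySem.Set.add, PySem.Set.contains]
        · simp [h1, h2, PySem.Set.add, PySem.Set.contains])]
  rw [show (List.foldl (fun ex e => if decide (pvFol e ∈ DESIRED_ORDER) = true then ex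
        else PySem.Set.add ex (pvFol e)) [] chars)
      = List.foldl (fun ex f => if decide (f ∈ DESIRED_ORDER) = true then ex
        else PySem.Set.add ex f) [] (chars.map pvFol) from (List.foldl_map (f := pvFol)
        (g := fun ex f => if decide (f ∈ DESIRED_ORDER) = true then ex else PySem.Set.add ex f)
        (l := chars) (init := ([] : PySem.Set String))).symm]
  rw [pv_filter_fold]
  rw [← PySem.Set.ofList_eq_foldl, pv_ofList_filter]
  rfl

-- flatMap over the kept folders equals flatMap with the dropped folders mapped to []
theorem pv_flatMap_filter (q : String → Bool) (l : List String)
    (F : String → List (List (String × String))) :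
    (l.filter (fun f => !q f)).flatMap F = l.flatMap (fun f => if q f then [] else F f) := by
  induction l with
  | nil => rfl
  | cons x xs ih => by_cases h : q x = true <;> simp [h, ih]

theorem pv_flatMap_congr {l : List String} {f g : String → List (List (String × String))}
    (h : ∀ x ∈ l, f x = g x) : l.flatMap f = l.flatMap g := by
  induction l with
  | nil => rfl
  | cons x xs ih =>
    simp only [List.flatMap_cons, h x (List.mem_cons_self), ih (fun y hy => h y (List.mem_cons_of_mem _ hy))]

-- A's phase-1 seen set, in closed form
def pvSeen (chars : List (List (String × String))) : PySem.Set String :=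
  DESIRED_ORDER.foldl (fun t f => if (pvGrp chars).contains f then t.add f else t) PySem.Set.empty

theorem pv_seen_contains (chars : List (List (String × String))) (k : String)
    (hk : k ∈ pvKS chars) :
    (pvSeen chars).contains k = decide (k ∈ DESIRED_ORDER) := by
  by_cases hd : k ∈ DESIRED_ORDER
  · have : k ∈ pvSeen chars := by
      rw [pvSeen, pv_seen_mem]
      exact Or.inr ⟨hd, (pv_contains_grp chars k).mpr hk⟩
    simp [PySem.Set.contains, this, hd]
  · have : k ∉ pvSeen chars := by
      rw [pvSeen, pv_seen_mem]
      rintro (h0 | ⟨h1, _⟩)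
      · simp [PySem.Set.empty] at h0
      · exact hd h1
    simp [PySem.Set.contains, this, hd]

-- the two new_chars lists agree
theorem pv_core (chars : List (List (String × String))) :
    ((pvGrp chars).items.foldl (fun acc kv =>
        if (DESIRED_ORDER.foldl (fun (p : List (List (String × String)) × PySem.Set String) folder =>
              if (pvGrp chars).contains folder then
                (p.1 ++ (pvGrp chars).getD folder [], p.2.add folder)
              else p) ([], PySem.Set.empty)).2.contains kv.1
         then acc else acc ++ kv.2)
      (DESIRED_ORDER.foldl (fun (p : List (List (String × String)) × PySem.Set String) folder =>
              if (pvGrp chars).contains folder then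
                (p.1 ++ (pvGrp chars).getD folder [], p.2.add folder)
              else p) ([], PySem.Set.empty)).1)
    = (DESIRED_ORDER ++
        chars.foldl (fun ex e =>
          if pvFol e ∉ DESIRED_ORDER ∧ pvFol e ∉ ex then ex ++ [pvFol e] else ex) []).flatMap
        (pvFilt chars) := by
  rw [pv_step1_fold]
  rw [pv_tail_fold]
  rw [pv_extras_eq, List.flatMap_append, List.nil_append]
  congr 1
  · -- phase 1
    apply pv_flatMap_congr
    intro f _
    by_cases h : (pvGrp chars).contains f = true
    · rw [if_pos h, pv_grp_getD]
    · rw [if_neg h, pv_filt_nil chars f]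
      intro hm
      exact h ((pv_contains_grp chars f).mpr ((pv_mem_KS chars f).mpr hm))
  · -- phase 2
    rw [PySem.Dict.items_eq_map_keys (pvGrp chars) (pv_grp_nodup chars) [], pv_grp_keys]
    rw [List.flatMap_map]
    rw [pv_flatMap_filter (fun f => decide (f ∈ DESIRED_ORDER)) (pvKS chars) (pvFilt chars)]
    apply pv_flatMap_congr
    intro k hk
    have hc : (pvSeen chars).contains k = decide (k ∈ DESIRED_ORDER) := pv_seen_contains chars k hk
    by_cases hd : k ∈ DESIRED_ORDER
    · have hs : (pvSeen chars).contains k = true := by rw [hc]; simp [hd]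
      rw [show (List.foldl (fun t f => if (pvGrp chars).contains f then t.add f else t)
          PySem.Set.empty DESIRED_ORDER) = pvSeen chars from rfl, hs]
      simp [hd]
    · have hs : (pvSeen chars).contains k = false := by rw [hc]; simp [hd]
      rw [show (List.foldl (fun t f => if (pvGrp chars).contains f then t.add f else t)
          PySem.Set.empty DESIRED_ORDER) = pvSeen chars from rfl, hs]
      simp [hd, pv_grp_getD]

-- ===== VERDICT (by name: the statement is the Claim_ definition above) =====
theorem reorder_characters_spec : Claim_equal_reorder_characters := by
  intro data _
  exact congrArg (fun nc => ((PySem.Dict.mk data).insert "characters" nc).items)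
    (pv_core ((PySem.Dict.mk data).getD "characters" []))
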